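-- pv_equiv track=rewrite | github.com/chenjienan/python-leetcode | OA/Microsoft/lexi_smallest_str.py | lexiSmallestStr2
-- ===== SOURCE A (Python) =====
-- def lexiSmallestStr2(s):
--     if len(s) <= 1:
--         return s
--
--     isRemoved = False
--     for i in range(len(s) - 1):
--         if s[i] > s[i+1]:
--             isRemoved = True
--             break
--
--     if not isRemoved:
--         return s[:-1]
--
--     return s[:i] + s[i+1:]
-- ===== SOURCE B (Python) =====
-- def lexiSmallestStr2(s):
--     if len(s) <= 1:
--         return s
--     return min(s[:i] + s[i+1:] for i in range(len(s)))
-- ===== Notes on version B (the rewrite author's own statement) =====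
-- stated objective: simpler
-- what changed: Replaced the first-descent scan (with break-flag and two slice branches) by a one-line brute force: take the min over all strings obtained by deleting one character.
import Mathlib
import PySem

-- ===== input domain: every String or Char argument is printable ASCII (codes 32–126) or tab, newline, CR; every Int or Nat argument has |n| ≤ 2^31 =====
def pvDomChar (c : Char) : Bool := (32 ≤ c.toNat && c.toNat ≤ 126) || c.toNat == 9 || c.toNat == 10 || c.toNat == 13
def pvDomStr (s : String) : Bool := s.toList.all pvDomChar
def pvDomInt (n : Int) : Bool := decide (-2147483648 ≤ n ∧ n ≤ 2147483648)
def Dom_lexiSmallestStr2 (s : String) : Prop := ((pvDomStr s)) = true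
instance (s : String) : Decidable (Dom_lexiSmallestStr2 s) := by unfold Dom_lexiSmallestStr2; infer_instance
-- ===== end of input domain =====

-- B replaces A's first-descent scan by a brute-force min over all one-character deletions: simpler (one line in Python), not faster.

-- ===== PORT A =====
-- the `for i in range(len(s)-1): if s[i] > s[i+1]: break` loop with its isRemoved flag:
-- returns the index of the first descent (isRemoved = True) or none (isRemoved = False)
def pvDescIdx : List Char → Nat → Option Nat
  | a :: b :: t, i => if a > b then some i else pvDescIdx (b :: t) (i + 1)
  | _, _ => none

def lexiSmallestStr2 (s : String) : String :=
  let l := s.toList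
  if l.length ≤ 1 then s
  else
    match pvDescIdx l 0 with
    | none => String.ofList (l.take (l.length - 1))          -- s[:-1]
    | some i => String.ofList (l.take i ++ l.drop (i + 1))   -- s[:i] + s[i+1:]

-- ===== PORT B =====
-- s[:i] + s[i+1:] : the string with the character at index i deleted (0 ≤ i < len)
def pvDelAt (l : List Char) (i : Nat) : List Char := l.take i ++ l.drop (i + 1)

def lexiSmallestStr2_alt (s : String) : String :=
  let l := s.toList
  if l.length ≤ 1 then s
  else
    -- min(s[:i] + s[i+1:] for i in range(len(s))): Python's min keeps the earlier
    -- element on ties, i.e. folds with `if x < acc then x else acc`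
    match (List.range l.length).map (pvDelAt l) with
    | [] => s  -- unreachable: range(len(s)) is nonempty since len(s) ≥ 2
    | c :: cs => String.ofList (cs.foldl (fun acc x => if x < acc then x else acc) c)

-- ===== PRECONDITION & SPEC =====
def Spec_lexiSmallestStr2 (s : String) (out : String) : Prop := out = lexiSmallestStr2_alt s
instance (s : String) (out : String) : Decidable (Spec_lexiSmallestStr2 s out) := by unfold Spec_lexiSmallestStr2; infer_instance

-- ===== CLAIM (what is proved, stated in full; the proofs are below) =====
def Claim_equal_lexiSmallestStr2 : Prop := ∀ (s : String), Dom_lexiSmallestStr2 s → Spec_lexiSmallestStr2 s (lexiSmallestStr2 s)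

-- ===== LEMMAS AND PROOFS =====

-- A's result, as a structural recursion: delete the first character that is
-- greater than its successor, or the last character if the list is nondecreasing.
def gRec : List Char → List Char
  | [] => []
  | [_] => []
  | a :: b :: t => if b < a then b :: t else a :: gRec (b :: t)

theorem pvDelAt_zero (a : Char) (t : List Char) : pvDelAt (a :: t) 0 = t := by
  simp [pvDelAt]

theorem pvDelAt_succ (a : Char) (t : List Char) (i : Nat) :
    pvDelAt (a :: t) (i + 1) = a :: pvDelAt t i := by
  simp [pvDelAt]

theorem pvDescIdx_shift : ∀ (l : List Char) (i : Nat),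
    pvDescIdx l (i + 1) = (pvDescIdx l i).map (· + 1)
  | [], _ => rfl
  | [_], _ => rfl
  | a :: b :: t, i => by
    by_cases h : b < a
    · simp [pvDescIdx, h]
    · simp only [pvDescIdx, if_neg h]
      exact pvDescIdx_shift (b :: t) (i + 1)

-- one unfolding step of the scan, with the accumulator shift applied
theorem pvDescIdx_cons_cons (a b : Char) (t : List Char) :
    pvDescIdx (a :: b :: t) 0 =
      if b < a then some 0 else (pvDescIdx (b :: t) 0).map (· + 1) := by
  show (if a > b then some 0 else pvDescIdx (b :: t) (0 + 1)) = _
  by_cases h : b < a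
  · simp [h]
  · rw [if_neg h, if_neg h, pvDescIdx_shift]

-- the A port's branch on pvDescIdx computes gRec
theorem aCore_eq : ∀ (a b : Char) (t : List Char),
    (match pvDescIdx (a :: b :: t) 0 with
      | none => (a :: b :: t).take ((a :: b :: t).length - 1)
      | some i => (a :: b :: t).take i ++ (a :: b :: t).drop (i + 1)) =
    gRec (a :: b :: t) := by
  intro a b t
  induction t generalizing a b with
  | nil =>
    by_cases h : b < a <;> simp [pvDescIdx, gRec, h]
  | cons c t' ih =>
    rw [pvDescIdx_cons_cons]
    by_cases h : b < a
    · simp [h, gRec]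
    · rw [if_neg h]
      have hih := ih b c
      cases hd : pvDescIdx (b :: c :: t') 0 with
      | none =>
        rw [hd] at hih
        simp only [Option.map_none, List.length_cons] at hih ⊢
        have hg : gRec (a :: b :: c :: t') = a :: gRec (b :: c :: t') := by
          simp [gRec, h]
        rw [hg, ← hih]
        simp [List.take_succ_cons]
      | some j =>
        rw [hd] at hih
        simp only [Option.map_some]
        simp only [List.take_succ_cons, List.drop_succ_cons] at hih ⊢
        simp [hih, gRec, if_neg h]

-- deleting A's way from a :: t is lexicographically ≤ deleting the head (which gives t)
theorem gRec_le_tail : ∀ (t : List Char) (a : Char), gRec (a :: t) ≤ t := by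
  intro t
  induction t with
  | nil => intro a; simp [gRec]
  | cons c t' ih =>
    intro a
    by_cases h : c < a
    · simp [gRec, h]
    · simp only [gRec, if_neg h]
      rcases lt_or_eq_of_le (not_lt.mp h) with h' | h'
      · exact le_of_lt (List.Lex.rel h')
      · subst h'
        exact List.cons_le_cons a (ih a)

-- gRec l is one of the one-character deletions
theorem gRec_mem : ∀ (l : List Char), 0 < l.length →
    ∃ i, i < l.length ∧ gRec l = pvDelAt l i := by
  intro l
  induction l with
  | nil => intro h; simp at h
  | cons a t ih =>
    intro _
    cases t with
    | nil => exact ⟨0, by simp, by simp [gRec, pvDelAt]⟩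
    | cons b t' =>
      by_cases h : b < a
      · exact ⟨0, by simp, by simp [gRec, h, pvDelAt_zero]⟩
      · obtain ⟨i, hi, heq⟩ := ih (by simp)
        refine ⟨i + 1, by simpa using hi, ?_⟩
        rw [pvDelAt_succ]
        simp [gRec, if_neg h, heq]

-- gRec l is ≤ every one-character deletion
theorem gRec_min : ∀ (l : List Char) (j : Nat), j < l.length → gRec l ≤ pvDelAt l j := by
  intro l
  induction l with
  | nil => intro j h; simp at h
  | cons a t ih =>
    intro j hj
    cases t with
    | nil =>
      have hj0 : j = 0 := by simp at hj; omega
      subst hj0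
      simp [gRec, pvDelAt]
    | cons b t' =>
      by_cases h : b < a
      · simp only [gRec, if_pos h]
        cases j with
        | zero => rw [pvDelAt_zero]
        | succ j' =>
          rw [pvDelAt_succ]
          exact le_of_lt (List.Lex.rel h)
      · simp only [gRec, if_neg h]
        cases j with
        | zero =>
          rw [pvDelAt_zero]
          rcases lt_or_eq_of_le (not_lt.mp h) with h' | h'
          · exact le_of_lt (List.Lex.rel h')
          · subst h'
            exact List.cons_le_cons a (gRec_le_tail t' a)
        | succ j' =>
          rw [pvDelAt_succ]
          exact List.cons_le_cons a (ih j' (by simpa using hj))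

-- the fold in port B returns an element of the candidate list …
theorem foldl_min_mem : ∀ (cs : List (List Char)) (c : List Char),
    cs.foldl (fun acc x => if x < acc then x else acc) c ∈ c :: cs := by
  intro cs
  induction cs with
  | nil => intro c; simp
  | cons x cs ih =>
    intro c
    simp only [List.foldl_cons]
    by_cases h : x < c
    · simp only [if_pos h]
      have := ih x
      simp only [List.mem_cons] at this ⊢
      tauto
    · simp only [if_neg h]
      have := ih c
      simp only [List.mem_cons] at this ⊢
      tauto

-- … that is ≤ every element of the candidate list
theorem foldl_min_le : ∀ (cs : List (List Char)) (c y : List Char), y ∈ c :: cs →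
    cs.foldl (fun acc x => if x < acc then x else acc) c ≤ y := by
  intro cs
  induction cs with
  | nil =>
    intro c y hy
    simp only [List.mem_cons, List.not_mem_nil, or_false] at hy
    subst hy; rfl
  | cons x cs ih =>
    intro c y hy
    simp only [List.foldl_cons]
    have hminc : (if x < c then x else c) ≤ c := by
      by_cases h : x < c
      · simp only [if_pos h]; exact le_of_lt h
      · simp [if_neg h]
    have hminx : (if x < c then x else c) ≤ x := by
      by_cases h : x < c
      · simp [if_pos h]
      · simp only [if_neg h]; exact not_lt.mp h
    rcases List.mem_cons.mp hy with rfl | hy'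
    · exact le_trans (ih _ _ (List.mem_cons_self)) hminc
    · rcases List.mem_cons.mp hy' with rfl | hy'' 
      · exact le_trans (ih _ _ (List.mem_cons_self)) hminx
      · exact ih _ _ (List.mem_cons.mpr (Or.inr hy''))

-- the fold of port B over all deletions equals gRec
theorem fold_eq_gRec (l : List Char) (c : List Char) (cs : List (List Char))
    (hc : (List.range l.length).map (pvDelAt l) = c :: cs) :
    cs.foldl (fun acc x => if x < acc then x else acc) c = gRec l := by
  have hlen : 0 < l.length := by
    by_contra h
    have : l.length = 0 := by omega
    simp [this] at hc
  -- fold result is some deletion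
  have hmem := foldl_min_mem cs c
  rw [← hc] at hmem
  obtain ⟨i, hi, heq⟩ := List.mem_map.mp hmem
  have hilt : i < l.length := List.mem_range.mp hi
  -- gRec l is a candidate
  obtain ⟨j, hj, hgj⟩ := gRec_mem l hlen
  have hgmem : gRec l ∈ c :: cs := by
    rw [← hc, hgj]
    exact List.mem_map.mpr ⟨j, List.mem_range.mpr hj, rfl⟩
  have h1 : cs.foldl (fun acc x => if x < acc then x else acc) c ≤ gRec l :=
    foldl_min_le cs c _ hgmem
  have h2 : gRec l ≤ cs.foldl (fun acc x => if x < acc then x else acc) c := by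
    rw [← heq]
    exact gRec_min l i hilt
  exact le_antisymm h1 h2

-- ===== VERDICT (by name: the statement is the Claim_ definition above) =====
theorem lexiSmallestStr2_spec : Claim_equal_lexiSmallestStr2 := by
  intro s _
  unfold Spec_lexiSmallestStr2 lexiSmallestStr2 lexiSmallestStr2_alt
  have hlt : s.toList.length = s.length := by simp
  by_cases hlen : s.length ≤ 1
  · simp only [hlt, if_pos hlen]
  · simp only [hlt, if_neg hlen]
    -- list has length ≥ 2
    obtain ⟨a, b, t, hl⟩ : ∃ a b t, s.toList = a :: b :: t := by
      cases hsl : s.toList with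
      | nil => rw [hsl] at hlt; simp [← hlt] at hlen
      | cons a t =>
        cases t with
        | nil => rw [hsl] at hlt; simp [← hlt] at hlen
        | cons b t' => exact ⟨a, b, t', rfl⟩
    have hne : (List.range s.length).map (pvDelAt s.toList) ≠ [] := by
      rw [← hlt, hl]; simp [List.range_succ]
    cases hc : (List.range s.length).map (pvDelAt s.toList) with
    | nil => exact absurd hc hne
    | cons c cs =>
      rw [← hlt] at hc
      have hred : (match c :: cs with
          | [] => s
          | c :: cs => String.ofList (cs.foldl (fun acc x => if x < acc then x else acc) c)) =
          String.ofList (cs.foldl (fun acc x => if x < acc then x else acc) c) := rfl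
      rw [hred, fold_eq_gRec s.toList c cs hc]
      rw [← hlt, hl, ← aCore_eq a b t]
      cases pvDescIdx (a :: b :: t) 0 <;> rfl
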